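-- pv_equiv track=rewrite | github.com/bdcheeseboro/ecc_gw_search | ecc_search_code/.ipynb_checkpoints/chain_trimmer-checkpoint.py | range_edges
-- ===== SOURCE A (Python) =====
-- from operator import itemgetter
-- import itertools
--
-- def range_edges(bad_chunks):
--     bad_start = []
--     bad_end = []
--     L = bad_chunks
--     for k, g in itertools.groupby( enumerate(L), lambda x: x[1]-x[0] ) :
--         a = list(map(itemgetter(1), g))
--         bad_start.append(a[0])
--         bad_end.append(a[-1]+200)
--
--     edges_start = []
--     edges_end = []
--     for i in range(len(bad_start)-1):
--         if bad_start[i+1]>bad_end[i]: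
--             edges_start.append(bad_start[i])
--             edges_end.append(bad_end[i])
--     return edges_start, edges_end
-- ===== SOURCE B (Python) =====
-- def range_edges(bad_chunks):
--     edges_start = []
--     edges_end = []
--     if not bad_chunks:
--         return edges_start, edges_end
--     run_start = bad_chunks[0]
--     prev = None  # (start, end) of the previously finished run
--     for i in range(1, len(bad_chunks)):
--         if bad_chunks[i] != bad_chunks[i - 1] + 1:
--             cur = (run_start, bad_chunks[i - 1] + 200)
--             if prev is not None and cur[0] > prev[1]:
--                 edges_start.append(prev[0])
--                 edges_end.append(prev[1])
--             prev = cur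
--             run_start = bad_chunks[i]
--     cur = (run_start, bad_chunks[-1] + 200)
--     if prev is not None and cur[0] > prev[1]:
--         edges_start.append(prev[0])
--         edges_end.append(prev[1])
--     return edges_start, edges_end
-- ===== Notes on version B (the rewrite author's own statement) =====
-- stated objective: simpler
-- what changed: Replaces the groupby-then-rescan two-pass construction (building bad_start/bad_end arrays and re-looping over indices) with one streaming pass that tracks only the current run's start and the previous finished run's (start, end) summary, emitting edges on the fly.
import Mathlib
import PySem

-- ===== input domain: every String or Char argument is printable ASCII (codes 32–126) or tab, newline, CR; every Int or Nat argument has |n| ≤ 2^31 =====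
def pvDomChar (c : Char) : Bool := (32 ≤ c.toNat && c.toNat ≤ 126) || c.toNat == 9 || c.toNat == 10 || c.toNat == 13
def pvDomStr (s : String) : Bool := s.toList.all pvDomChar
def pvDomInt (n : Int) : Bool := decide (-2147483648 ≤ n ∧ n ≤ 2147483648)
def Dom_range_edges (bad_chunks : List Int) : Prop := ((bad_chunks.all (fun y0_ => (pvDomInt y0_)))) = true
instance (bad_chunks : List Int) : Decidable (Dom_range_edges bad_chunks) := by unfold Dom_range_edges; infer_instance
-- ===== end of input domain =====

-- B replaces A's groupby-then-rescan two-pass construction with one streaming pass that keeps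
-- only the current run's start and the previous finished run's summary (objective: simpler).

-- ===== PORT A =====
-- itertools.groupby(l, key): consecutive elements with equal key form one group; key here is x[1]-x[0]
def pvGroupBy : List (Int × Int) → List (List (Int × Int))
  | [] => []
  | p :: ps =>
    match pvGroupBy ps with
    | [] => [[p]]
    | [] :: gs => [p] :: gs   -- unreachable: groups are nonempty
    | (q :: qs) :: gs =>
      if p.2 - p.1 = q.2 - q.1 then (p :: q :: qs) :: gs else [p] :: (q :: qs) :: gs

-- the first for-loop: bad_start.append(a[0]); bad_end.append(a[-1]+200)
def pvFirstLoop (gs : List (List (Int × Int))) : List Int × List Int :=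
  gs.foldl (fun acc a => (acc.1 ++ [(a.headD (0, 0)).2], acc.2 ++ [(a.getLastD (0, 0)).2 + 200])) ([], [])

def range_edges (bad_chunks : List Int) : List Int × List Int :=
  let L := bad_chunks
  let bse := pvFirstLoop (pvGroupBy (PySem.List.enumerate L))
  let bad_start := bse.1
  let bad_end := bse.2
  let ese :=
    (List.range (bad_start.length - 1)).foldl
      (fun acc i =>
        if bad_start.getD (i + 1) 0 > bad_end.getD i 0 then
          (acc.1 ++ [bad_start.getD i 0], acc.2 ++ [bad_end.getD i 0])
        else acc) ([], [])
  (ese.1, ese.2)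

-- ===== PORT B =====
-- streaming loop: pc = previous chunk, rs = current run start, prev = previous finished run's (start, end)
def altLoop (pc rs : Int) (prev : Option (Int × Int)) (es ee : List Int) :
    List Int → List Int × List Int
  | [] =>
    match prev with
    | some (ps, pe) => if rs > pe then (es ++ [ps], ee ++ [pe]) else (es, ee)
    | none => (es, ee)
  | x :: xs =>
    if x ≠ pc + 1 then
      match prev with
      | some (ps, pe) =>
        if rs > pe then altLoop x x (some (rs, pc + 200)) (es ++ [ps]) (ee ++ [pe]) xs
        else altLoop x x (some (rs, pc + 200)) es ee xs
      | none => altLoop x x (some (rs, pc + 200)) es ee xs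
    else altLoop x rs prev es ee xs

def range_edges_alt (bad_chunks : List Int) : List Int × List Int :=
  match bad_chunks with
  | [] => ([], [])
  | x :: xs => altLoop x x none [] [] xs

-- ===== PRECONDITION & SPEC =====
def Spec_range_edges (bad_chunks : List Int) (out : List Int × List Int) : Prop := out = range_edges_alt bad_chunks
instance (bad_chunks : List Int) (out : List Int × List Int) : Decidable (Spec_range_edges bad_chunks out) := by unfold Spec_range_edges; infer_instance

-- ===== CLAIM (what is proved, stated in full; the proofs are below) =====
def Claim_equal_range_edges : Prop := ∀ (bad_chunks : List Int), Dom_range_edges bad_chunks → Spec_range_edges bad_chunks (range_edges bad_chunks)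

-- ===== LEMMAS AND PROOFS =====

-- Common intermediate notion: the list of (start, last+200) pairs of maximal consecutive runs.
def runsAux (s pc : Int) : List Int → List (Int × Int)
  | [] => [(s, pc + 200)]
  | x :: xs => if x = pc + 1 then runsAux s x xs else (s, pc + 200) :: runsAux x x xs

def runsOf : List Int → List (Int × Int)
  | [] => []
  | x :: xs => runsAux x x xs

-- edges of a pairs list: adjacent pairs (s1,e1),(s2,e2) emit (s1,e1) when s2 > e1
def edgesOf : List (Int × Int) → List Int × List Int
  | [] => ([], [])
  | [_] => ([], [])
  | (s1, e1) :: (s2, e2) :: rest =>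
    let E := edgesOf ((s2, e2) :: rest)
    if s2 > e1 then (s1 :: E.1, e1 :: E.2) else E

theorem edgesOf_cons_cons (s1 e1 s2 e2 : Int) (rest : List (Int × Int)) :
    edgesOf ((s1, e1) :: (s2, e2) :: rest) =
      if s2 > e1 then
        (s1 :: (edgesOf ((s2, e2) :: rest)).1, e1 :: (edgesOf ((s2, e2) :: rest)).2)
      else edgesOf ((s2, e2) :: rest) := rfl

-- ---------- B side ----------
theorem altLoop_eq_some (xs : List Int) : ∀ (pc rs ps pe : Int) (es ee : List Int),
    altLoop pc rs (some (ps, pe)) es ee xs =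
      (es ++ (edgesOf ((ps, pe) :: runsAux rs pc xs)).1,
       ee ++ (edgesOf ((ps, pe) :: runsAux rs pc xs)).2) := by
  induction xs with
  | nil =>
    intro pc rs ps pe es ee
    show (if rs > pe then (es ++ [ps], ee ++ [pe]) else (es, ee)) = _
    rw [show runsAux rs pc [] = [(rs, pc + 200)] from rfl, edgesOf_cons_cons]
    by_cases hgt : rs > pe
    · rw [if_pos hgt, if_pos hgt]; simp [edgesOf]
    · rw [if_neg hgt, if_neg hgt]; simp [edgesOf]
  | cons x xs ih =>
    intro pc rs ps pe es ee
    by_cases hx : x = pc + 1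
    · have hcond : ¬ (x ≠ pc + 1) := by simpa using hx
      show (if x ≠ pc + 1 then _ else altLoop x rs (some (ps, pe)) es ee xs) = _
      rw [if_neg hcond, ih, show runsAux rs pc (x :: xs) = runsAux rs x xs from by
        rw [runsAux, if_pos hx]]
    · show (if x ≠ pc + 1 then
          (if rs > pe then altLoop x x (some (rs, pc + 200)) (es ++ [ps]) (ee ++ [pe]) xs
           else altLoop x x (some (rs, pc + 200)) es ee xs) else _) = _
      rw [if_pos hx, show runsAux rs pc (x :: xs) = (rs, pc + 200) :: runsAux x x xs from by
        rw [runsAux, if_neg hx], edgesOf_cons_cons]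
      by_cases hgt : rs > pe
      · rw [if_pos hgt, if_pos hgt, ih]; simp
      · rw [if_neg hgt, if_neg hgt, ih]

theorem altLoop_eq_none (xs : List Int) : ∀ (pc rs : Int) (es ee : List Int),
    altLoop pc rs none es ee xs =
      (es ++ (edgesOf (runsAux rs pc xs)).1, ee ++ (edgesOf (runsAux rs pc xs)).2) := by
  induction xs with
  | nil => intro pc rs es ee; simp [altLoop, runsAux, edgesOf]
  | cons x xs ih =>
    intro pc rs es ee
    by_cases hx : x = pc + 1
    · have hcond : ¬ (x ≠ pc + 1) := by simpa using hx
      show (if x ≠ pc + 1 then _ else altLoop x rs none es ee xs) = _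
      rw [if_neg hcond, ih, show runsAux rs pc (x :: xs) = runsAux rs x xs from by
        rw [runsAux, if_pos hx]]
    · show (if x ≠ pc + 1 then altLoop x x (some (rs, pc + 200)) es ee xs else _) = _
      rw [if_pos hx, altLoop_eq_some, show runsAux rs pc (x :: xs) = (rs, pc + 200) :: runsAux x x xs from by
        rw [runsAux, if_neg hx]]

theorem alt_eq_edges_runs (l : List Int) :
    range_edges_alt l = edgesOf (runsOf l) := by
  cases l with
  | nil => rfl
  | cons x xs => simp [range_edges_alt, runsOf, altLoop_eq_none]

-- ---------- A side ----------
theorem pvGroupBy_cons_eq (p q : Int × Int) (ps qs : List (Int × Int)) (gs : List (List (Int × Int)))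
    (h : pvGroupBy ps = (q :: qs) :: gs) :
    pvGroupBy (p :: ps) =
      if p.2 - p.1 = q.2 - q.1 then (p :: q :: qs) :: gs else [p] :: (q :: qs) :: gs := by
  simp only [pvGroupBy, h]

-- groups of an enumeration are nonempty and start with the first enumerated element
theorem pvGroupBy_enum_shape (xs : List Int) : ∀ (i x : Int),
    ∃ t gs, pvGroupBy (PySem.List.enumerate (x :: xs) i) = ((i, x) :: t) :: gs := by
  induction xs with
  | nil =>
    intro i x
    exact ⟨[], [], by simp [PySem.List.enumerate_cons, PySem.List.enumerate_nil, pvGroupBy]⟩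
  | cons y ys ih =>
    intro i x
    obtain ⟨t, gs, h⟩ := ih (i + 1) y
    rw [PySem.List.enumerate_cons, pvGroupBy_cons_eq (i, x) (i + 1, y) _ t gs h]
    split_ifs <;> exact ⟨_, _, rfl⟩

-- the pair (head.snd, last.snd+200) extracted from each group
def pairOf (a : List (Int × Int)) : Int × Int := ((a.headD (0, 0)).2, (a.getLastD (0, 0)).2 + 200)

-- key structural lemma: group pairs of the enumeration = runs, up to the first run's start
theorem groups_pairs (xs : List Int) : ∀ (i x : Int),
    ∃ E R, (pvGroupBy (PySem.List.enumerate (x :: xs) i)).map pairOf = (x, E) :: R ∧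
      ∀ s, runsAux s x xs = (s, E) :: R := by
  induction xs with
  | nil =>
    intro i x
    refine ⟨x + 200, [], ?_, fun s => rfl⟩
    simp [PySem.List.enumerate_cons, PySem.List.enumerate_nil, pvGroupBy, pairOf]
  | cons y ys ih =>
    intro i x
    obtain ⟨E, R, hmap, hruns⟩ := ih (i + 1) y
    obtain ⟨t, gs, hsh⟩ := pvGroupBy_enum_shape ys (i + 1) y
    rw [PySem.List.enumerate_cons, pvGroupBy_cons_eq (i, x) (i + 1, y) _ t gs hsh]
    rw [hsh] at hmap
    simp only [List.map_cons, List.cons.injEq] at hmap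
    obtain ⟨h1, h2⟩ := hmap
    by_cases hy : y = x + 1
    · refine ⟨E, R, ?_, ?_⟩
      · rw [if_pos (by simp; omega)]
        simp only [List.map_cons, h2]
        have hpair : pairOf ((i, x) :: (i + 1, y) :: t) = (x, E) := by
          have h1' := congrArg Prod.snd h1
          simp only [pairOf] at h1' ⊢
          simp only [List.headD_cons, List.getLastD_cons] at h1' ⊢
          exact Prod.ext rfl h1'
        rw [hpair]
      · intro s
        rw [runsAux, if_pos hy]
        exact hruns s
    · refine ⟨x + 200, (y, E) :: R, ?_, ?_⟩
      · rw [if_neg (by simp; omega)]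
        simp [pairOf, h2]
        simpa [pairOf] using congrArg Prod.snd h1
      · intro s
        rw [runsAux, if_neg hy, hruns y]

theorem groups_pairs_eq_runs (l : List Int) :
    (pvGroupBy (PySem.List.enumerate l 0)).map pairOf = runsOf l := by
  cases l with
  | nil => simp [PySem.List.enumerate_nil, pvGroupBy, runsOf]
  | cons x xs =>
    obtain ⟨E, R, hmap, hruns⟩ := groups_pairs xs 0 x
    rw [runsOf, hruns x, hmap]

-- the first loop builds (ps.map fst, ps.map snd) where ps is the pairs list of the groups
theorem firstLoop_acc (gs : List (List (Int × Int))) : ∀ (bs be : List Int),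
    gs.foldl (fun acc a => (acc.1 ++ [(a.headD (0, 0)).2], acc.2 ++ [(a.getLastD (0, 0)).2 + 200])) (bs, be) =
      (bs ++ (gs.map pairOf).map Prod.fst, be ++ (gs.map pairOf).map Prod.snd) := by
  induction gs with
  | nil => intro bs be; simp
  | cons g gs ih =>
    intro bs be
    simp only [List.foldl_cons]
    rw [ih]
    simp [pairOf, List.append_assoc]

theorem firstLoop_eq (gs : List (List (Int × Int))) :
    pvFirstLoop gs = ((gs.map pairOf).map Prod.fst, (gs.map pairOf).map Prod.snd) := by
  rw [pvFirstLoop, firstLoop_acc]; simp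

-- getD of a fst/snd projection
theorem getD_map_fst (ps : List (Int × Int)) : ∀ i : Nat,
    (ps.map Prod.fst).getD i 0 = (ps.getD i (0, 0)).1 := by
  induction ps with
  | nil => intro i; simp
  | cons p ps ih =>
    intro i
    cases i with
    | zero => simp
    | succ n =>
      have := ih n
      simp only [List.getD] at this ⊢
      simpa using this

theorem getD_map_snd (ps : List (Int × Int)) : ∀ i : Nat,
    (ps.map Prod.snd).getD i 0 = (ps.getD i (0, 0)).2 := by
  induction ps with
  | nil => intro i; simp
  | cons p ps ih =>
    intro i
    cases i with
    | zero => simp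
    | succ n =>
      have := ih n
      simp only [List.getD] at this ⊢
      simpa using this

-- the step function of A's second (index) loop, over the fused pairs list
def idxStep (ps : List (Int × Int)) (acc : List Int × List Int) (i : Nat) : List Int × List Int :=
  if (ps.getD (i + 1) (0, 0)).1 > (ps.getD i (0, 0)).2 then
    (acc.1 ++ [(ps.getD i (0, 0)).1], acc.2 ++ [(ps.getD i (0, 0)).2])
  else acc

theorem idxStep_shift (p : Int × Int) (ps : List (Int × Int)) (acc : List Int × List Int) (i : Nat) :
    idxStep (p :: ps) acc (i + 1) = idxStep ps acc i := rfl

theorem foldl_idxStep_cons (p : Int × Int) (ps : List (Int × Int)) : ∀ (m : Nat) (init : List Int × List Int),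
    (List.range (m + 1)).foldl (idxStep (p :: ps)) init =
      (List.range m).foldl (idxStep ps) (idxStep (p :: ps) init 0) := by
  intro m
  induction m with
  | zero => intro init; simp [List.range_succ]
  | succ n ih =>
    intro init
    rw [List.range_succ, List.foldl_append, ih]
    simp only [List.foldl_cons, List.foldl_nil, idxStep_shift]
    rw [show List.range (n + 1) = List.range n ++ [n] from List.range_succ, List.foldl_append]
    simp

theorem secondLoop_eq (ps : List (Int × Int)) : ∀ (es ee : List Int),
    (List.range (ps.length - 1)).foldl (idxStep ps) (es, ee) =
      (es ++ (edgesOf ps).1, ee ++ (edgesOf ps).2) := by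
  induction ps with
  | nil => intro es ee; simp [edgesOf]
  | cons p ps ih =>
    cases ps with
    | nil => intro es ee; simp [edgesOf]
    | cons q rest =>
      intro es ee
      obtain ⟨s1, e1⟩ := p
      obtain ⟨s2, e2⟩ := q
      have hlen : ((s1, e1) :: (s2, e2) :: rest : List (Int × Int)).length - 1 = rest.length + 1 := by
        simp
      rw [hlen, foldl_idxStep_cons]
      have hstep0 : idxStep ((s1, e1) :: (s2, e2) :: rest) (es, ee) 0 =
          if s2 > e1 then (es ++ [s1], ee ++ [e1]) else (es, ee) := rfl
      have hlen2 : rest.length = ((s2, e2) :: rest : List (Int × Int)).length - 1 := by simp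
      rw [hstep0, hlen2, edgesOf_cons_cons]
      by_cases hgt : s2 > e1
      · rw [if_pos hgt, if_pos hgt, ih]; simp
      · rw [if_neg hgt, if_neg hgt, ih]

theorem a_eq_edges_runs (l : List Int) : range_edges l = edgesOf (runsOf l) := by
  have hfl : pvFirstLoop (pvGroupBy (PySem.List.enumerate l)) =
      ((runsOf l).map Prod.fst, (runsOf l).map Prod.snd) := by
    rw [firstLoop_eq, groups_pairs_eq_runs]
  simp only [range_edges, hfl]
  have hfun : (fun (acc : List Int × List Int) (i : Nat) =>
      if ((runsOf l).map Prod.fst).getD (i + 1) 0 > ((runsOf l).map Prod.snd).getD i 0 then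
        (acc.1 ++ [((runsOf l).map Prod.fst).getD i 0], acc.2 ++ [((runsOf l).map Prod.snd).getD i 0])
      else acc) = idxStep (runsOf l) := by
    funext acc i
    simp only [idxStep, getD_map_fst, getD_map_snd]
  simp only [List.length_map, hfun]
  rw [secondLoop_eq (runsOf l) [] []]
  simp

-- ===== VERDICT (by name: the statement is the Claim_ definition above) =====
theorem range_edges_spec : Claim_equal_range_edges := by
  intro l _
  unfold Spec_range_edges
  rw [a_eq_edges_runs, alt_eq_edges_runs]
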